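-- pv_equiv track=rewrite | github.com/msarfalkhamidi/python | Strings/convert_to_alt_caps.py | convert_to_alt_caps
-- ===== SOURCE A (Python) =====
-- def convert_to_alt_caps(string):
--     string = string.lower()
--     converted = ""
--     j = 0
--     for i in range(len(string)):
--         if string[i] != " ":
--             j = j+1
--         if j%2 != 1:
--             converted = converted + string[i].upper()
--         else:
--             converted = converted + string[i]
--     return converted
-- ===== SOURCE B (Python) =====
-- def convert_to_alt_caps(string):
--     low = string.lower()
--     core = [c for c in low if c != " "]
--     transformed = [c.upper() if i % 2 else c for i, c in enumerate(core)]
--     out = []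
--     k = 0
--     for c in low:
--         if c == " ":
--             out.append(" ")
--         else:
--             out.append(transformed[k])
--             k += 1
--     return "".join(out)
-- ===== Notes on version B (the rewrite author's own statement) =====
-- stated objective: alternative
-- what changed: Replaces A's single counter-driven loop (running non-space counter deciding case per character) with a filter pass that cases the non-space characters by their 0-based index parity, followed by an interleaving pass that re-inserts the spaces.
import Mathlib
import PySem

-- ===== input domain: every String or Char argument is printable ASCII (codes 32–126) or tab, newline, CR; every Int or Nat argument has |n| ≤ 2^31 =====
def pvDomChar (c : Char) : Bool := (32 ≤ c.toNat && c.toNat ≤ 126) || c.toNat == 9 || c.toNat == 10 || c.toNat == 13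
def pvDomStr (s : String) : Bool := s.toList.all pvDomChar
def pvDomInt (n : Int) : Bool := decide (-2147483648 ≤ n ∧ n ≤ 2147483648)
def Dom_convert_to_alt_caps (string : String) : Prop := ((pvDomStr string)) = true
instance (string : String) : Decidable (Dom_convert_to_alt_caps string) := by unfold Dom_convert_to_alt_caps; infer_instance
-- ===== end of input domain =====

-- B replaces A's counter-driven single loop by casing the filtered non-space characters by
-- index parity and interleaving the spaces back in (objective: alternative decomposition).

-- ===== PORT A =====
-- A's loop body: bump the non-space count j, then append upper/lower by parity of j.
def pvStepA (st : List Char × Int) (c : Char) : List Char × Int :=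
  let j : Int := if c ≠ ' ' then st.2 + 1 else st.2
  if PySem.Int.mod j 2 ≠ 1 then (st.1 ++ [PySem.Chars.upperChar c], j)
  else (st.1 ++ [c], j)

-- A: lowercase, then one loop with running non-space count j; uppercase when j % 2 != 1.
def convert_to_alt_caps (string : String) : String :=
  let s := PySem.Chars.lower string.toList
  String.ofList (s.foldl pvStepA ([], 0)).1

-- ===== PORT B =====
-- reassembly loop of Source B: emit spaces verbatim, otherwise consume the next transformed char
def pvInterleave : List Char → List Char → List Char
  | [], _ => []
  | c :: cs, ts =>
    if c = ' ' then ' ' :: pvInterleave cs ts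
    else
      match ts with
      | [] => []            -- unreachable: one transformed char per non-space char
      | t :: ts' => t :: pvInterleave cs ts'

def convert_to_alt_caps_alt (string : String) : String :=
  let low := PySem.Chars.lower string.toList
  let core := low.filter (fun c => c ≠ ' ')
  let transformed := (PySem.List.enumerate core 0).map
      (fun ic => if PySem.Int.mod ic.1 2 ≠ 0 then PySem.Chars.upperChar ic.2 else ic.2)
  String.ofList (pvInterleave low transformed)

-- ===== PRECONDITION & SPEC =====
def Spec_convert_to_alt_caps (string : String) (out : String) : Prop := out = convert_to_alt_caps_alt string
instance (string : String) (out : String) : Decidable (Spec_convert_to_alt_caps string out) := by unfold Spec_convert_to_alt_caps; infer_instance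

-- ===== CLAIM (what is proved, stated in full; the proofs are below) =====
def Claim_equal_convert_to_alt_caps : Prop := ∀ (string : String), Dom_convert_to_alt_caps string → Spec_convert_to_alt_caps string (convert_to_alt_caps string)

-- ===== LEMMAS AND PROOFS =====

-- A's loop, started with non-space count j, produces B's interleaving of the
-- parity-cased filtered characters indexed from j.
theorem pv_loop_eq (s : List Char) (acc : List Char) (j : Nat) :
    (s.foldl pvStepA (acc, (j : Int))).1
    = acc ++ pvInterleave s ((PySem.List.enumerate (s.filter (fun c => c ≠ ' ')) (j : Int)).map
        (fun ic => if PySem.Int.mod ic.1 2 ≠ 0 then PySem.Chars.upperChar ic.2 else ic.2)) := by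
  induction s generalizing acc j with
  | nil => simp [pvInterleave]
  | cons c cs ih =>
    by_cases hc : c = ' '
    · subst hc
      have hstep : pvStepA (acc, (j : Int)) ' ' = (acc ++ [' '], (j : Int)) := by
        have hu : PySem.Chars.upperChar ' ' = ' ' := by decide
        unfold pvStepA; split_ifs <;> simp_all
      rw [List.foldl_cons, hstep, ih (acc ++ [' ']) j]
      simp [pvInterleave]
    · have hmod : PySem.Int.mod ((j : Int) + 1) 2 = (((j + 1) % 2 : Nat) : Int) := by
        have : ((j : Int) + 1) = ((j + 1 : Nat) : Int) := by push_cast; ring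
        rw [this]; exact_mod_cast PySem.Int.mod_natCast (j + 1) 2
      have hcast : ((j : Int) + 1) = ((j + 1 : Nat) : Int) := by push_cast; ring
      rcases Nat.even_or_odd j with hj | hj
      · -- j even: first of the pair stays lower-case; A's test (j+1)%2 ≠ 1 is false
        have h2 : j % 2 = 0 := Nat.even_iff.mp hj
        have h1 : (j + 1) % 2 = 1 := by omega
        have hstep : pvStepA (acc, (j : Int)) c = (acc ++ [c], (j : Int) + 1) := by
          simp only [pvStepA, ne_eq, hc, not_false_eq_true, if_true, hmod, h1]
          simp
        rw [List.foldl_cons, hstep, hcast, ih (acc ++ [c]) (j + 1), ← hcast]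
        simp [pvInterleave, hc]
        intro h; exfalso; omega
      · -- j odd: uppercased on both sides
        have h2 : j % 2 = 1 := Nat.odd_iff.mp hj
        have h1 : (j + 1) % 2 = 0 := by omega
        have hstep : pvStepA (acc, (j : Int)) c
            = (acc ++ [PySem.Chars.upperChar c], (j : Int) + 1) := by
          simp only [pvStepA, ne_eq, hc, not_false_eq_true, if_true, hmod, h1]
          simp
        rw [List.foldl_cons, hstep, hcast, ih (acc ++ [PySem.Chars.upperChar c]) (j + 1), ← hcast]
        simp [pvInterleave, hc]
        intro h; exfalso; omega

-- ===== VERDICT (by name: the statement is the Claim_ definition above) =====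
theorem convert_to_alt_caps_spec : Claim_equal_convert_to_alt_caps := by
  intro string _
  show _ = _
  unfold convert_to_alt_caps convert_to_alt_caps_alt
  have h := pv_loop_eq (PySem.Chars.lower string.toList) [] 0
  simp only [Int.natCast_zero, List.nil_append] at h
  exact congrArg String.ofList h
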